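-- pv_equiv track=rewrite | github.com/Rxdxxn/FunctiileHomework | practica.py | cel_mai_mare
-- ===== SOURCE A (Python) =====
-- def cel_mai_mare(a):
--     b=[]
--     while a>0:
--         c=a%10
--         b.append(c)
--         a//=10
--     b.sort(reverse=True)
--     c="".join(str(i) for i in b)
--     return (c)
-- ===== SOURCE B (Python) =====
-- def cel_mai_mare(a):
--     counts = [0] * 10
--     while a > 0:
--         counts[a % 10] += 1
--         a //= 10
--     out = []
--     for d in range(9, -1, -1):
--         out.extend([d] * counts[d])
--     return "".join(str(i) for i in out)
-- ===== Notes on version B (the rewrite author's own statement) =====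
-- stated objective: alternative
-- what changed: A extracts the digits into a list and calls a comparison sort (reverse=True) before joining; B tallies each extracted digit into a ten-slot counts array and emits the result by one descending bucket walk (counting sort), with no sort call at all.
import Mathlib
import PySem

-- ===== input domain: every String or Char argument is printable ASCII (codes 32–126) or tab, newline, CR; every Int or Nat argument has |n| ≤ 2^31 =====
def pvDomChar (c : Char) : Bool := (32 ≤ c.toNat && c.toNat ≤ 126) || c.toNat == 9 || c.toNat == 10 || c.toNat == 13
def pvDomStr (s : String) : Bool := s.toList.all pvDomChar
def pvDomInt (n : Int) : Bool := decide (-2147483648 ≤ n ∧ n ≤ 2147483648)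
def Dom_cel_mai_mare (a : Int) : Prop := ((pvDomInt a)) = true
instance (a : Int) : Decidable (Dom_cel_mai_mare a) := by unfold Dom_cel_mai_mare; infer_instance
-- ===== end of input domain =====

-- B replaces A's comparison sort of the digit list by a ten-bucket counting sort (tally while
-- extracting digits, then one descending bucket walk); objective: alternative algorithm.

-- termination helper for both digit-extraction loops (a // 10 shrinks while a > 0)
theorem pvFdivLt (a : Int) (h : 0 < a) : (PySem.Int.floordiv a 10).toNat < a.toNat := by
  have h1 := Int.mul_fdiv_add_fmod a 10
  have h2 : 0 ≤ a.fmod 10 := Int.fmod_nonneg (le_of_lt h) (by norm_num)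
  have h3 : a.fmod 10 < 10 := Int.fmod_lt_of_pos a (by norm_num)
  simp only [PySem.Int.floordiv]
  omega

-- ===== PORT A =====
-- the while loop: b=[]; while a>0: b.append(a%10); a//=10
def pvDigitsA (a : Int) (b : List Int) : List Int :=
  if h : 0 < a then pvDigitsA (PySem.Int.floordiv a 10) (b ++ [PySem.Int.mod a 10]) else b
termination_by a.toNat
decreasing_by exact pvFdivLt a h

def cel_mai_mare (a : Int) : String :=
  let b := pvDigitsA a []
  let b2 := PySem.List.sorted b (fun x => x) true
  PySem.Str.join "" (b2.map PySem.Int.toStr)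

-- ===== PORT B =====
-- the while loop: counts=[0]*10; while a>0: counts[a%10]+=1; a//=10
-- (the index a%10 lies in 0..9, inside the 10-slot list, so List.set / pyGetD are exact here)
def pvCountsB (a : Int) (counts : List Int) : List Int :=
  if h : 0 < a then
    pvCountsB (PySem.Int.floordiv a 10)
      (counts.set (PySem.Int.mod a 10).toNat
        (PySem.List.pyGetD counts (PySem.Int.mod a 10) 0 + 1))
  else counts
termination_by a.toNat
decreasing_by exact pvFdivLt a h

def cel_mai_mare_alt (a : Int) : String :=
  let counts := pvCountsB a (List.replicate 10 (0 : Int))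
  let out := (PySem.List.pyRange 9 (-1) (-1)).foldl
    (fun acc d => acc ++ PySem.List.pyRepeat [d] (PySem.List.pyGetD counts d 0)) []
  PySem.Str.join "" (out.map PySem.Int.toStr)

-- ===== PRECONDITION & SPEC =====
def Spec_cel_mai_mare (a : Int) (out : String) : Prop := out = cel_mai_mare_alt a
instance (a : Int) (out : String) : Decidable (Spec_cel_mai_mare a out) := by unfold Spec_cel_mai_mare; infer_instance

-- ===== CLAIM (what is proved, stated in full; the proofs are below) =====
def Claim_equal_cel_mai_mare : Prop := ∀ (a : Int), Dom_cel_mai_mare a → Spec_cel_mai_mare a (cel_mai_mare a)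

-- ===== LEMMAS AND PROOFS =====

-- the digit sequence both loops traverse
def pvDigs (a : Int) : List Int :=
  if h : 0 < a then PySem.Int.mod a 10 :: pvDigs (PySem.Int.floordiv a 10) else []
termination_by a.toNat
decreasing_by exact pvFdivLt a h

theorem pvDigs_bounds (a : Int) : ∀ d ∈ pvDigs a, 0 ≤ d ∧ d < 10 := by
  induction a using pvDigs.induct with
  | case1 a h ih =>
    rw [pvDigs, dif_pos h]
    intro d hd
    rcases List.mem_cons.mp hd with rfl | hmem
    · exact ⟨Int.fmod_nonneg (le_of_lt h) (by norm_num), Int.fmod_lt_of_pos a (by norm_num)⟩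
    · exact ih d hmem
  | case2 a h => rw [pvDigs, dif_neg h]; intro d hd; simp at hd

theorem pvDigitsA_eq (a : Int) : ∀ b, pvDigitsA a b = b ++ pvDigs a := by
  induction a using pvDigs.induct with
  | case1 a h ih =>
    intro b
    rw [pvDigitsA, dif_pos h, pvDigs, dif_pos h, ih]
    simp
  | case2 a h =>
    intro b
    rw [pvDigitsA, dif_neg h, pvDigs, dif_neg h]
    simp

-- the tally update B performs per digit
def pvBump (c : List Int) (d : Int) : List Int :=
  c.set d.toNat (PySem.List.pyGetD c d 0 + 1)

theorem pvCountsB_eq (a : Int) : ∀ c, pvCountsB a c = (pvDigs a).foldl pvBump c := by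
  induction a using pvDigs.induct with
  | case1 a h ih =>
    intro c
    rw [pvCountsB, dif_pos h, pvDigs, dif_pos h, ih]
    simp [pvBump]
  | case2 a h =>
    intro c
    rw [pvCountsB, dif_neg h, pvDigs, dif_neg h]
    simp

theorem pvBump_foldl (L : List Int) : ∀ c : List Int, (∀ d ∈ L, 0 ≤ d ∧ d < 10) → c.length = 10 →
    (L.foldl pvBump c).length = 10 ∧
    ∀ i : Int, 0 ≤ i → i < 10 →
      PySem.List.pyGetD (L.foldl pvBump c) i 0 = PySem.List.pyGetD c i 0 + (L.count i : Int) := by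
  induction L with
  | nil => intro c _ hlen; simpa using hlen
  | cons d L ih =>
    intro c hb hlen
    have hd := hb d List.mem_cons_self
    have hlen' : (pvBump c d).length = 10 := by simp [pvBump, hlen]
    obtain ⟨h1, h2⟩ := ih (pvBump c d) (fun x hx => hb x (List.mem_cons_of_mem _ hx)) hlen'
    refine ⟨by simpa [List.foldl_cons] using h1, ?_⟩
    intro i hi0 hi10
    have hget : ∀ (cc : List Int), cc.length = 10 →
        PySem.List.pyGetD (pvBump cc d) i 0 =
          PySem.List.pyGetD cc i 0 + (if d = i then 1 else 0) := by
      intro cc hcc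
      have hdn : d.toNat < cc.length := by omega
      have hin : i.toNat < cc.length := by omega
      rw [pvBump, PySem.List.pyGetD_of_nonneg _ _ hi0, PySem.List.pyGetD_of_nonneg _ _ hi0]
      rw [List.getD_eq_getElem _ _ (by simpa using hin), List.getD_eq_getElem _ _ hin]
      rw [List.getElem_set]
      by_cases hdi : d = i
      · subst hdi
        have hv : PySem.List.pyGetD cc d 0 = cc[d.toNat] := by
          rw [PySem.List.pyGetD_of_nonneg _ _ hd.1, List.getD_eq_getElem _ _ hdn]
        simp [hv]
      · have hne : d.toNat ≠ i.toNat := by omega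
        simp [hne, hdi]
    rw [List.foldl_cons, h2 i hi0 hi10, hget c hlen, List.count_cons]
    by_cases hdi : d = i <;> simp [hdi] <;> omega

-- count of a descending-bucket flatten
theorem pvFlatMap_count (f : Int → Nat) (x : Int) :
    ∀ ds : List Int, ds.Nodup →
      ((ds.flatMap fun d => List.replicate (f d) d).count x) = if x ∈ ds then f x else 0 := by
  intro ds
  induction ds with
  | nil => simp
  | cons d ds ih =>
    intro hnd
    rw [List.flatMap_cons, List.count_append, List.count_replicate,
        ih (List.nodup_cons.mp hnd).2]
    rcases List.nodup_cons.mp hnd with ⟨hni, _⟩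
    by_cases hdx : d = x
    · subst hdx; simp [hni]
    · have hxd : ¬ x = d := fun h => hdx h.symm
      have : (d == x) = false := by simp [hdx]
      simp [this, hxd]

theorem pvFlatMap_pairwise (f : Int → Nat) :
    ∀ ds : List Int, ds.Pairwise (fun x y => y < x) →
      (ds.flatMap fun d => List.replicate (f d) d).Pairwise (fun x y => y ≤ x) := by
  intro ds
  induction ds with
  | nil => simp
  | cons d ds ih =>
    intro hp
    rcases List.pairwise_cons.mp hp with ⟨hhead, htail⟩
    rw [List.flatMap_cons, List.pairwise_append]
    refine ⟨List.pairwise_replicate.mpr (Or.inr le_rfl), ih htail, ?_⟩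
    intro a ha b hb
    have ha' : a = d := List.eq_of_mem_replicate ha
    rcases List.mem_flatMap.mp hb with ⟨e, he, hbe⟩
    have hb' : b = e := List.eq_of_mem_replicate hbe
    rw [ha', hb']
    exact le_of_lt (hhead e he)

-- the descending bucket walk equals Python's stable reverse sort of the digit list
theorem pvSorted_eq_flatten (L : List Int) (hb : ∀ d ∈ L, 0 ≤ d ∧ d < 10) :
    PySem.List.sorted L (fun x => x) true =
      ([9, 8, 7, 6, 5, 4, 3, 2, 1, 0] : List Int).flatMap
        (fun d => List.replicate (L.count d) d) := by
  have hnodup : ([9, 8, 7, 6, 5, 4, 3, 2, 1, 0] : List Int).Nodup := by decide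
  have hdesc : ([9, 8, 7, 6, 5, 4, 3, 2, 1, 0] : List Int).Pairwise (fun x y => y < x) := by decide
  have hperm : (PySem.List.sorted L (fun x => x) true).Perm
      (([9, 8, 7, 6, 5, 4, 3, 2, 1, 0] : List Int).flatMap
        (fun d => List.replicate (L.count d) d)) := by
    rw [List.perm_iff_count]
    intro x
    rw [pvFlatMap_count _ x _ hnodup]
    have hcs : (PySem.List.sorted L (fun x => x) true).count x = L.count x :=
      (PySem.List.sorted_perm L (fun x => x) true).count_eq x
    by_cases hx : x ∈ ([9, 8, 7, 6, 5, 4, 3, 2, 1, 0] : List Int)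
    · simp [hx, hcs]
    · have hnx : x ∉ L := by
        intro hmem
        have := hb x hmem
        apply hx
        simp only [List.mem_cons, List.not_mem_nil, or_false]
        omega
      simp [hx, hcs, List.count_eq_zero.mpr hnx]
  exact List.eq_of_perm_of_sorted (fun a b _ _ h1 h2 => le_antisymm h2 h1)
    (PySem.List.sorted_pairwise_rev L (fun x => x))
    (pvFlatMap_pairwise _ _ hdesc) hperm

-- ===== VERDICT (by name: the statement is the Claim_ definition above) =====
set_option maxHeartbeats 800000 in
theorem cel_mai_mare_spec : Claim_equal_cel_mai_mare := by
  intro a _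
  simp only [Spec_cel_mai_mare, cel_mai_mare, cel_mai_mare_alt]
  have hb := pvDigs_bounds a
  have hA : pvDigitsA a [] = pvDigs a := by simpa using pvDigitsA_eq a []
  obtain ⟨hlen, hget⟩ := by
    have := pvBump_foldl (pvDigs a) (List.replicate 10 (0 : Int)) hb (by simp)
    exact this
  have hcnt : ∀ i : Int, 0 ≤ i → i < 10 →
      PySem.List.pyGetD (pvCountsB a (List.replicate 10 (0 : Int))) i 0 = ((pvDigs a).count i : Int) := by
    intro i h0 h10
    rw [pvCountsB_eq a, hget i h0 h10, PySem.List.pyGetD_of_nonneg _ _ h0,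
        List.getD_replicate _ (by omega : i.toNat < 10)]
    ring
  rw [hA]
  congr 1
  rw [PySem.List.foldl_append_eq_flatMap, List.nil_append, pvSorted_eq_flatten (pvDigs a) hb]
  have hrange : PySem.List.pyRange 9 (-1) (-1) = ([9, 8, 7, 6, 5, 4, 3, 2, 1, 0] : List Int) := by
    rw [PySem.List.pyRange_neg_one]
    decide
  rw [hrange]
  refine congrArg _ (List.flatMap_congr ?_)
  intro d hd
  have hd' : 0 ≤ d ∧ d < 10 := by
    simp only [List.mem_cons, List.not_mem_nil, or_false] at hd
    rcases hd with h|h|h|h|h|h|h|h|h|h <;> subst h <;> norm_num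
  rw [PySem.List.pyRepeat_singleton, hcnt d hd'.1 hd'.2]
  simp
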